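-- pv_equiv track=rewrite | github.com/ezelikman/parsel | generated/train_2892_7.py | is_kebab
-- ===== SOURCE A (Python) =====
-- def is_kebab(s):
--     # if s is empty, False
--     if s == '':
--         return False
--     # if s is not a string, False
--     if type(s) != str:
--         return False
--     # if s is not lowercase, False
--     if s != s.lower():
--         return False
--     # if s contains anything other than a-z or -, False
--     for c in s:
--         if not (c.isalpha() or c == '-'):
--             return False
--     # if s contains a - at the beginning or end, False
--     if s[0] == '-' or s[-1] == '-':
--         return False
--     # if s contains more than one - in a row, False
--     for i in range(len(s)-1):
--         if s[i] == '-' and s[i+1] == '-':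
--             return False
--     # otherwise, True
--     return True
-- ===== SOURCE B (Python) =====
-- def is_kebab(s):
--     # single state-machine pass (prev-char sentinel) instead of A's three separate scans
--     if type(s) != str or s == '' or s != s.lower():
--         return False
--     prev = '-'
--     for c in s:
--         if c == '-':
--             if prev == '-':
--                 return False
--         elif not c.isalpha():
--             return False
--         prev = c
--     return prev != '-'
-- ===== Notes on version B (the rewrite author's own statement) =====
-- stated objective: simpler
-- what changed: Replaces A's three separate scans (character-validity loop, boundary-dash check, indexed adjacent-dash loop over range(len(s)-1)) with a single state-machine pass carrying the previous character (seeded with '-').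
import Mathlib
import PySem

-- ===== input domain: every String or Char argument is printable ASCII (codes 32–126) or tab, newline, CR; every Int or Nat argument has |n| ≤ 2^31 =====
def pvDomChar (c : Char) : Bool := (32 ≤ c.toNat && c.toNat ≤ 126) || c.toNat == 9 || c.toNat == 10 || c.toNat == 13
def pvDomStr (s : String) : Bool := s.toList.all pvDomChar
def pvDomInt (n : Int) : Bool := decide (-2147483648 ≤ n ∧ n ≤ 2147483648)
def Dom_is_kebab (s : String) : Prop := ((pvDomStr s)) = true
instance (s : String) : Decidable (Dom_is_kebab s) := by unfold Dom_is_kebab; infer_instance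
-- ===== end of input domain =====

-- B replaces A's three separate scans with one state-machine pass; objective: simpler.

-- ===== PORT A =====
-- literal transliteration of A: empty guard, lower-case guard, character scan,
-- boundary-dash check (s[0], s[-1]), indexed adjacent-dash loop over range(len(s)-1)
def is_kebab (s : String) : Bool :=
  let l := s.toList
  if l = [] then false
  else if l ≠ PySem.Chars.lower l then false
  else if ¬ (l.all fun c => PySem.Chars.isalpha c || c == '-') then false
  else if PySem.List.pyGetD l 0 ' ' == '-' || PySem.List.pyGetD l (-1) ' ' == '-' then false
  else if ¬ ((PySem.List.pyRange 0 ((l.length : Int) - 1) 1).all fun i =>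
      !(PySem.List.pyGetD l i ' ' == '-' && PySem.List.pyGetD l (i + 1) ' ' == '-')) then false
  else true

-- ===== PORT B =====
-- loop body of Source B: state = previous character, `none` = early `return False`
def kebabStep (st : Option Char) (c : Char) : Option Char :=
  match st with
  | none => none
  | some prev =>
    if c = '-' then (if prev = '-' then none else some c)
    else if PySem.Chars.isalpha c then some c
    else none

def is_kebab_alt (s : String) : Bool :=
  let l := s.toList
  if l = [] ∨ l ≠ PySem.Chars.lower l then false
  else
    match l.foldl kebabStep (some '-') with
    | none => false
    | some prev => prev != '-'

-- ===== PRECONDITION & SPEC =====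
def Spec_is_kebab (s : String) (out : Bool) : Prop := out = is_kebab_alt s
instance (s : String) (out : Bool) : Decidable (Spec_is_kebab s out) := by unfold Spec_is_kebab; infer_instance

-- ===== CLAIM (what is proved, stated in full; the proofs are below) =====
def Claim_equal_is_kebab : Prop := ∀ (s : String), Dom_is_kebab s → Spec_is_kebab s (is_kebab s)

-- ===== LEMMAS AND PROOFS =====

abbrev pvR (a b : Char) : Prop := ¬ (a = '-' ∧ b = '-')

theorem kebab_foldl_none (l : List Char) : l.foldl kebabStep none = none := by
  induction l with
  | nil => rfl
  | cons c rest ih => simpa [kebabStep] using ih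

theorem kebab_foldl_char (l : List Char) (prev : Char) (hl : l ≠ []) :
    (match l.foldl kebabStep (some prev) with
     | none => false
     | some p => p != '-') =
    ((l.all fun c => PySem.Chars.isalpha c || c == '-') &&
     decide (List.IsChain pvR (prev :: l)) &&
     decide (l.getLast hl ≠ '-')) := by
  induction l generalizing prev with
  | nil => exact absurd rfl hl
  | cons c rest ih =>
    cases rest with
    | nil =>
      by_cases hc : c = '-'
      · subst hc
        by_cases hp : prev = '-' <;>
          simp [kebabStep, hp, pvR, PySem.Chars.isalpha]
      · by_cases ha : PySem.Chars.isalpha c = true <;>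
          simp [kebabStep, hc, ha, pvR]
    | cons d rest' =>
      have hne : d :: rest' ≠ [] := by simp
      have hdash : PySem.Chars.isalpha '-' = false := by decide
      by_cases hc : c = '-'
      · subst hc
        by_cases hp : prev = '-'
        · subst hp
          simp [List.foldl, kebabStep, kebab_foldl_none, pvR]
        · have hstep : kebabStep (some prev) '-' = some '-' := by simp [kebabStep, hp]
          rw [List.foldl_cons, hstep, ih (prev := '-') hne]
          simp [pvR, hp, hdash, List.isChain_cons_cons, List.getLast]
      · by_cases ha : PySem.Chars.isalpha c = true
        · have hstep : kebabStep (some prev) c = some c := by simp [kebabStep, hc, ha]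
          rw [List.foldl_cons, hstep, ih (prev := c) hne]
          simp [pvR, hc, ha, List.isChain_cons_cons, List.getLast]
        · have hstep : kebabStep (some prev) c = none := by simp [kebabStep, hc, ha]
          rw [List.foldl_cons, hstep, kebab_foldl_none]
          simp [ha, hc]

theorem kebab_range_chain (l : List Char) :
    (((PySem.List.pyRange 0 ((l.length : Int) - 1) 1).all fun i =>
        !(PySem.List.pyGetD l i ' ' == '-' && PySem.List.pyGetD l (i + 1) ' ' == '-')) = true) ↔
    List.IsChain pvR l := by
  rw [List.isChain_iff_getElem]
  simp only [List.all_eq_true, PySem.List.mem_pyRange_one]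
  constructor
  · intro h i hi
    have := h (i : Int) ⟨by omega, by omega⟩
    rw [show ((i : Int) + 1) = ((i + 1 : Nat) : Int) by push_cast; ring,
        PySem.List.pyGetD_natCast, PySem.List.pyGetD_natCast,
        List.getD_eq_getElem l ' ' (by omega), List.getD_eq_getElem l ' ' (by omega)] at this
    intro hcon
    simp [hcon.1, hcon.2] at this
  · intro h i hmem
    obtain ⟨k, rfl⟩ : ∃ k : ℕ, i = (k : ℤ) := ⟨i.toNat, by omega⟩
    obtain ⟨h0, h1⟩ := hmem
    rw [show ((k : Int) + 1) = ((k + 1 : Nat) : Int) by push_cast; ring,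
        PySem.List.pyGetD_natCast, PySem.List.pyGetD_natCast,
        List.getD_eq_getElem l ' ' (by omega), List.getD_eq_getElem l ' ' (by omega)]
    have := h k (by omega)
    by_cases hA : l[k] = '-' <;> by_cases hB : l[k + 1] = '-' <;>
      simp [hA, hB, pvR] at this ⊢

theorem kebab_chain_cons (l : List Char) (h0 : l ≠ []) :
    List.IsChain pvR ('-' :: l) ↔ (l.head h0 ≠ '-' ∧ List.IsChain pvR l) := by
  cases l with
  | nil => exact absurd rfl h0
  | cons c rest =>
    rw [List.isChain_cons_cons]
    simp [pvR, List.head]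

theorem kebab_getD_head (l : List Char) (hl : l ≠ []) :
    PySem.List.pyGetD l 0 ' ' = l.head hl := by
  cases l with
  | nil => exact absurd rfl hl
  | cons c rest => simp [PySem.List.pyGetD_zero_cons, List.head]

-- ===== VERDICT (by name: the statement is the Claim_ definition above) =====
theorem is_kebab_spec : Claim_equal_is_kebab := by
  intro s _
  unfold Spec_is_kebab is_kebab is_kebab_alt
  set l := s.toList with hls
  by_cases h0 : l = []
  · simp [h0]
  · by_cases hlow : l = PySem.Chars.lower l
    · rw [if_neg h0, if_neg (not_not_intro hlow),
          if_neg (not_or.mpr ⟨h0, not_not_intro hlow⟩),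
          kebab_foldl_char l '-' h0]
      simp only [kebab_range_chain l]
      rw [PySem.List.pyGetD_neg_one l ' ' h0, kebab_getD_head l h0]
      have hchain := kebab_chain_cons l h0
      by_cases hall : (l.all fun c => PySem.Chars.isalpha c || c == '-') = true
      · by_cases hh : l.head h0 = '-'
        · simp [hall, hh, hchain]
        · by_cases ht : l.getLast h0 = '-'
          · simp [hall, hh, ht, hchain]
          · by_cases hch : List.IsChain pvR l
            · simp [hall, hh, ht, hch, hchain]
            · simp [hall, hh, ht, hch, hchain]
      · simp [hall]
    · rw [if_neg h0, if_pos (by simpa using hlow), if_pos (Or.inr (by simpa using hlow))]
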